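-- pv_equiv track=rewrite | github.com/zenderock/servelink-app | app/utils/environments.py | group_branches_by_environment
-- ===== SOURCE A (Python) =====
-- def get_environment_for_branch(branch, environments) -> dict | None:
--     """
--     Find the highest priority environment that matches a branch.
--
--     Args:
--         branch: The branch name
--         environments: List of environments in priority order (highest first)
--
--     Returns:
--         The matching environment or None if no match is found
--     """
--     production_env = environments[0]
--     if production_env['branch'] == branch:
--         return production_env
--
--     for environment in environments[1:]:
--         pattern = environment['branch']
--
--         if pattern == branch:
--             return environment
--
--         if '*' in pattern:
--             if pattern.startswith('*'):
--                 if branch.endswith(pattern[1:]):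
--                     return environment
--             elif pattern.endswith('*'):
--                 if branch.startswith(pattern[:-1]):
--                     return environment
--             else:
--                 prefix, suffix = pattern.split('*', 1)
--                 if branch.startswith(prefix) and branch.endswith(suffix):
--                     return environment
--
--     return None
--
-- def group_branches_by_environment(environments, branches) -> dict[str, list[str]]:
--     """
--     Group branches by their matching environments based on priority.
--
--     Args:
--         environments: List of environments in priority order (highest first)
--         branches: List of all branch names
--
--     Returns:
--         Dictionary mapping environment slugs to lists of matching branch names
--     """
--     # Initialize the result dictionary with empty lists for each environment
--     result = {environment['slug']: [] for environment in environments}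
--
--     # Add an 'unmatched' category for branches that don't match any environment
--     result['unmatched'] = []
--
--     for branch in branches:
--         # Find the highest priority environment that matches this branch
--         matching_env = get_environment_for_branch(branch, environments)
--
--         if matching_env:
--             # Add this branch to its matching environment
--             result[matching_env['slug']].append(branch)
--         else:
--             # If no environment matches, add to unmatched
--             result['unmatched'].append(branch)
--
--     return result
-- ===== SOURCE B (Python) =====
-- def _glob_match(branch, pattern):
--     """Single-'*' positional glob rule used for every environment after the first."""
--     if '*' not in pattern:
--         return False
--     if pattern.startswith('*'):
--         return branch.endswith(pattern[1:])
--     if pattern.endswith('*'):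
--         return branch.startswith(pattern[:-1])
--     prefix, suffix = pattern.split('*', 1)
--     return branch.startswith(prefix) and branch.endswith(suffix)
--
--
-- def group_branches_by_environment(environments, branches) -> dict[str, list[str]]:
--     # Inverted traversal: walk the environments in priority order, each one
--     # claiming the still-unclaimed branches it matches (first environment:
--     # exact name only; the rest: exact or glob).  The claims are recorded as
--     # branch -> slug, and the groups are then emitted in branch order.
--     assign = {}
--     remaining = list(branches)
--     first = True
--     for env in environments:
--         if not remaining:
--             break
--         pattern = env['branch']
--         slug = env['slug']
--         still = []
--         for b in remaining:
--             if pattern == b or ((not first) and _glob_match(b, pattern)):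
--                 assign[b] = slug
--             else:
--                 still.append(b)
--         remaining = still
--         first = False
--
--     result = {env['slug']: [] for env in environments}
--     result['unmatched'] = []
--     for b in branches:
--         result[assign.get(b, 'unmatched')].append(b)
--     return result
-- ===== Notes on version B (the rewrite author's own statement) =====
-- stated objective: alternative
-- what changed: Loops are inverted: B walks the environments once in priority order, each claiming the still-unclaimed branches it matches (exact-only for the first, exact-or-single-'*'-glob for the rest) into a branch-to-slug map, then emits the groups in a single pass over branches, instead of A's per-branch rescan of the whole environment list.
import Mathlib
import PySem

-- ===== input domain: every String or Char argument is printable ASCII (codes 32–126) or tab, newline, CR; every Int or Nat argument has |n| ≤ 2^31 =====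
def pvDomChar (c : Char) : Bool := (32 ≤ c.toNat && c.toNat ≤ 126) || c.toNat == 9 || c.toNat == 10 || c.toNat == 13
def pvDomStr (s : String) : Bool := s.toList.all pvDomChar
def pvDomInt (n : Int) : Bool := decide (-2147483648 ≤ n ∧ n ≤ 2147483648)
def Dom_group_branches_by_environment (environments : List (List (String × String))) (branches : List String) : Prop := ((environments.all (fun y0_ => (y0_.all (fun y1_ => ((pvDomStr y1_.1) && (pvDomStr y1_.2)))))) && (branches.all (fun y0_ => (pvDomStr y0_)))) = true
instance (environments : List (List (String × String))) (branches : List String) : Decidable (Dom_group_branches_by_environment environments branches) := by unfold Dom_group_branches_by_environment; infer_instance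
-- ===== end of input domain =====

-- B groups by iterating ENVIRONMENTS (claiming still-unassigned branches per environment,
-- then emitting groups in branch order) instead of A's per-branch rescan of the environment
-- list; objective: alternative decomposition, same exact matching rule and output.

-- env[k] for the admitted inputs (Python raises KeyError when k is absent; such inputs are outside Pre_)
def pvEnvGet (env : List (String × String)) (k : String) : String :=
  (PySem.Dict.mk env).getD k ""

-- ===== PORT A =====
-- the 'for environment in environments[1:]' loop of get_environment_for_branch, with its early returns
def pvFindLoop (branch : String) : List (List (String × String)) → Option (List (String × String))
  | [] => none
  | env :: rest =>
    let pattern := pvEnvGet env "branch"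
    if pattern == branch then some env
    else if PySem.Str.isIn "*" pattern then
      if PySem.Str.startswith pattern "*" then
        if PySem.Str.endswith branch (PySem.Str.slice pattern (some 1) none) then some env
        else pvFindLoop branch rest
      else if PySem.Str.endswith pattern "*" then
        if PySem.Str.startswith branch (PySem.Str.slice pattern none (some (-1))) then some env
        else pvFindLoop branch rest
      else
        match PySem.Str.splitMax? pattern "*" 1 with
        | some (prefix_ :: suffix :: _) =>
          if PySem.Str.startswith branch prefix_ && PySem.Str.endswith branch suffix then some env
          else pvFindLoop branch rest
        | _ => pvFindLoop branch rest   -- unreachable: split with separator "*" ≠ "" yields two pieces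
    else pvFindLoop branch rest

def get_environment_for_branch (branch : String) (environments : List (List (String × String))) :
    Option (List (String × String)) :=
  match PySem.List.pyGet? environments 0 with
  | none => none   -- Python raises IndexError here; such inputs are outside Pre_
  | some production_env =>
    if pvEnvGet production_env "branch" == branch then some production_env
    else pvFindLoop branch (PySem.List.slice environments (some 1) none)

def group_branches_by_environment (environments : List (List (String × String))) (branches : List String) : List (String × List String) :=
  let result0 := environments.foldl (fun d env => d.insert (pvEnvGet env "slug") ([] : List String)) PySem.Dict.empty
  let result1 := result0.insert "unmatched" []
  let result2 := branches.foldl (fun d branch =>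
      match get_environment_for_branch branch environments with
      | some env => d.modify (pvEnvGet env "slug") [] (· ++ [branch])
      | none => d.modify "unmatched" [] (· ++ [branch])) result1
  result2.items

-- ===== PORT B =====
-- Source B's _glob_match
def pvGlobMatch (branch pattern : String) : Bool :=
  if !(PySem.Str.isIn "*" pattern) then false
  else if PySem.Str.startswith pattern "*" then
    PySem.Str.endswith branch (PySem.Str.slice pattern (some 1) none)
  else if PySem.Str.endswith pattern "*" then
    PySem.Str.startswith branch (PySem.Str.slice pattern none (some (-1)))
  else
    match PySem.Str.splitMax? pattern "*" 1 with
    | some (prefix_ :: suffix :: _) => PySem.Str.startswith branch prefix_ && PySem.Str.endswith branch suffix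
    | _ => false   -- unreachable: split with separator "*" ≠ "" yields two pieces

-- Source B's 'for env in environments' loop (with its 'if not remaining: break'),
-- state = (assign, remaining) plus the 'first' flag
def pvClaimLoop : List (List (String × String)) → PySem.Dict String String → List String → Bool →
    PySem.Dict String String × List String
  | [], assign, remaining, _ => (assign, remaining)
  | env :: rest, assign, remaining, first =>
    if remaining.isEmpty then (assign, remaining)
    else
      let pattern := pvEnvGet env "branch"
      let slug := pvEnvGet env "slug"
      let t := remaining.foldl
        (fun t b => if pattern == b || (!first && pvGlobMatch b pattern) then (t.1.insert b slug, t.2)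
                    else (t.1, t.2 ++ [b])) (assign, ([] : List String))
      pvClaimLoop rest t.1 t.2 false

def group_branches_by_environment_alt (environments : List (List (String × String))) (branches : List String) : List (String × List String) :=
  let assign := (pvClaimLoop environments PySem.Dict.empty branches true).1
  let result0 := environments.foldl (fun d env => d.insert (pvEnvGet env "slug") ([] : List String)) PySem.Dict.empty
  let result1 := result0.insert "unmatched" []
  let result2 := branches.foldl (fun d b => d.modify (assign.getD b "unmatched") [] (· ++ [b])) result1
  result2.items

-- ===== PRECONDITION & SPEC =====
-- Pre_ excludes inputs where the Python A raises: a missing 'slug' key (KeyError), and — when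
-- branches is non-empty — an empty environment list (IndexError at environments[0]) or a missing
-- 'branch' key (KeyError).  It is slightly narrower than A's exact domain: A reads 'branch' keys
-- lazily, so it can return although some never-reached environment lacks 'branch'; such inputs are
-- excluded here (B returns the same value on them in the cited example).
def Pre_group_branches_by_environment (environments : List (List (String × String))) (branches : List String) : Prop :=
  (∀ env ∈ environments, "slug" ∈ env.map Prod.fst) ∧
  (branches ≠ [] → environments ≠ [] ∧ ∀ env ∈ environments, "branch" ∈ env.map Prod.fst)
instance (environments : List (List (String × String))) (branches : List String) : Decidable (Pre_group_branches_by_environment environments branches) := by unfold Pre_group_branches_by_environment; infer_instance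

def pvWitness_group_branches_by_environment : (List (List (String × String))) × List String :=
  ([[("branch", "main"), ("slug", "prod")], [("branch", "feat/*"), ("slug", "dev")]],
   ["main", "feat/x", "other"])

def Spec_group_branches_by_environment (environments : List (List (String × String))) (branches : List String) (out : List (String × List String)) : Prop := out = group_branches_by_environment_alt environments branches
instance (environments : List (List (String × String))) (branches : List String) (out : List (String × List String)) : Decidable (Spec_group_branches_by_environment environments branches out) := by unfold Spec_group_branches_by_environment; infer_instance

-- ===== CLAIM (what is proved, stated in full; the proofs are below) =====
def Claim_equal_group_branches_by_environment : Prop := ∀ (environments : List (List (String × String))) (branches : List String), Dom_group_branches_by_environment environments branches → Pre_group_branches_by_environment environments branches → Spec_group_branches_by_environment environments branches (group_branches_by_environment environments branches)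

-- ===== LEMMAS AND PROOFS =====

-- the exact-or-glob rule applied by A's tail loop and by B for every environment after the first
def pvMatchFull (b : String) (env : List (String × String)) : Bool :=
  pvEnvGet env "branch" == b || pvGlobMatch b (pvEnvGet env "branch")

theorem pvFindLoop_eq_find? (b : String) (l : List (List (String × String))) :
    pvFindLoop b l = l.find? (pvMatchFull b) := by
  induction l with
  | nil => rfl
  | cons env rest ih =>
    rw [List.find?_cons]
    by_cases h1 : (pvEnvGet env "branch" == b) = true
    · simp [pvFindLoop, pvMatchFull, h1]
    · by_cases h2 : PySem.Chars.isIn ['*'] (pvEnvGet env "branch").toList = true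
      · by_cases h3 : PySem.Chars.startswith (pvEnvGet env "branch").toList ['*'] = true
        · by_cases h4 : PySem.Chars.endswith b.toList (PySem.List.slice (pvEnvGet env "branch").toList (some 1)) = true
          · simp [pvFindLoop, pvMatchFull, pvGlobMatch, h1, h2, h3, h4]
          · simp [pvFindLoop, pvMatchFull, pvGlobMatch, h1, h2, h3, h4, ih]
        · by_cases h5 : PySem.Chars.endswith (pvEnvGet env "branch").toList ['*'] = true
          · by_cases h6 : PySem.Chars.startswith b.toList (PySem.List.slice (pvEnvGet env "branch").toList none (some (-1))) = true
            · simp [pvFindLoop, pvMatchFull, pvGlobMatch, h1, h2, h3, h5, h6]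
            · simp [pvFindLoop, pvMatchFull, pvGlobMatch, h1, h2, h3, h5, h6, ih]
          · cases hsp : PySem.Str.splitMax? (pvEnvGet env "branch") "*" 1 with
            | none => simp [pvFindLoop, pvMatchFull, pvGlobMatch, h1, h2, h3, h5, hsp, ih]
            | some ps =>
              match ps with
              | [] => simp [pvFindLoop, pvMatchFull, pvGlobMatch, h1, h2, h3, h5, hsp, ih]
              | [p] => simp [pvFindLoop, pvMatchFull, pvGlobMatch, h1, h2, h3, h5, hsp, ih]
              | p :: s :: tl =>
                cases h7 : (PySem.Chars.startswith b.toList p.toList && PySem.Chars.endswith b.toList s.toList) with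
                | true => simp [pvFindLoop, pvMatchFull, pvGlobMatch, h1, h2, h3, h5, hsp, h7]
                | false => simp [pvFindLoop, pvMatchFull, pvGlobMatch, h1, h2, h3, h5, hsp, h7, ih]
      · simp [pvFindLoop, pvMatchFull, pvGlobMatch, h1, h2, ih]

theorem inner_fst_get? (p : String → Bool) (slug : String) (rem : List String)
    (d : PySem.Dict String String) (acc : List String) (x : String) :
    ((rem.foldl (fun t b => if p b then (t.1.insert b slug, t.2) else (t.1, t.2 ++ [b]))
        (d, acc)).1).get? x = if x ∈ rem ∧ p x = true then some slug else d.get? x := by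
  induction rem generalizing d acc with
  | nil => simp
  | cons b rem ih =>
    simp only [List.foldl_cons]
    by_cases hb : p b = true
    · rw [if_pos hb]
      rw [ih]
      by_cases hx : x = b
      · subst hx
        simp [hb, PySem.Dict.get?_insert_self]
      · rw [PySem.Dict.get?_insert_of_ne (hne := hx)]
        simp [hx]
    · rw [if_neg hb]
      rw [ih]
      by_cases hx : x = b
      · subst hx
        simp [hb]
      · simp [hx]

theorem inner_snd (p : String → Bool) (slug : String) (rem : List String)
    (d : PySem.Dict String String) (acc : List String) :
    (rem.foldl (fun t b => if p b then (t.1.insert b slug, t.2) else (t.1, t.2 ++ [b]))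
        (d, acc)).2 = acc ++ rem.filter (fun b => !p b) := by
  induction rem generalizing d acc with
  | nil => simp
  | cons b rem ih =>
    simp only [List.foldl_cons]
    by_cases hb : p b = true
    · rw [if_pos hb, ih]
      simp [hb]
    · rw [if_neg hb, ih]
      simp [hb]

theorem pvClaimLoop_get? (l : List (List (String × String))) (d : PySem.Dict String String)
    (rem : List String) (x : String) :
    ((pvClaimLoop l d rem false).1).get? x =
      if x ∈ rem then
        (match l.find? (pvMatchFull x) with
         | some e => some (pvEnvGet e "slug")
         | none => d.get? x)
      else d.get? x := by
  induction l generalizing d rem with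
  | nil => simp [pvClaimLoop]
  | cons env rest ih =>
    simp only [pvClaimLoop]
    by_cases hre : rem.isEmpty = true
    · have : rem = [] := List.isEmpty_iff.mp hre
      subst this
      simp
    · rw [if_neg hre]
      have hcond : (fun (t : PySem.Dict String String × List String) b =>
          if pvEnvGet env "branch" == b || (!false && pvGlobMatch b (pvEnvGet env "branch")) then
            (t.1.insert b (pvEnvGet env "slug"), t.2) else (t.1, t.2 ++ [b]))
          = (fun t b => if pvMatchFull b env then (t.1.insert b (pvEnvGet env "slug"), t.2)
                        else (t.1, t.2 ++ [b])) := by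
        funext t b
        simp [pvMatchFull]
      simp only [hcond]
      rw [ih]
      rw [inner_fst_get? (p := fun b => pvMatchFull b env),
          inner_snd (p := fun b => pvMatchFull b env)]
      rw [List.find?_cons]
      by_cases hm : pvMatchFull x env = true
      · by_cases hx : x ∈ rem
        · simp [hm, hx]
        · simp [hm, hx]
      · by_cases hx : x ∈ rem
        · simp only [List.nil_append, List.mem_filter]
          rw [if_pos ⟨hx, by simp [hm]⟩]
          simp [hm, hx]
        · simp only [List.nil_append, List.mem_filter]
          rw [if_neg (by intro h; exact hx h.1)]
          simp [hm, hx]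

theorem pvClaimLoop_top (e0 : List (String × String)) (rest : List (List (String × String)))
    (branches : List String) (b : String) (hb : b ∈ branches) :
    ((pvClaimLoop (e0 :: rest) PySem.Dict.empty branches true).1).get? b =
      if pvEnvGet e0 "branch" == b then some (pvEnvGet e0 "slug")
      else (rest.find? (pvMatchFull b)).map (fun e => pvEnvGet e "slug") := by
  have hne : branches.isEmpty = false := by
    cases branches with
    | nil => cases hb
    | cons y ys => rfl
  simp only [pvClaimLoop, hne, Bool.false_eq_true, if_false]
  have hcond : (fun (t : PySem.Dict String String × List String) c =>
      if pvEnvGet e0 "branch" == c || (!true && pvGlobMatch c (pvEnvGet e0 "branch")) then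
        (t.1.insert c (pvEnvGet e0 "slug"), t.2) else (t.1, t.2 ++ [c]))
      = (fun t c => if (pvEnvGet e0 "branch" == c) then (t.1.insert c (pvEnvGet e0 "slug"), t.2)
                    else (t.1, t.2 ++ [c])) := by
    funext t c
    simp
  simp only [hcond]
  rw [pvClaimLoop_get?]
  rw [inner_fst_get? (p := fun c => pvEnvGet e0 "branch" == c),
      inner_snd (p := fun c => pvEnvGet e0 "branch" == c)]
  by_cases hm : (pvEnvGet e0 "branch" == b) = true
  · rw [if_pos hm]
    have : b ∉ ([] : List String) ++ branches.filter (fun c => !(pvEnvGet e0 "branch" == c)) := by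
      simp [hm]
    rw [if_neg this, if_pos ⟨hb, hm⟩]
  · rw [if_neg hm]
    have : b ∈ ([] : List String) ++ branches.filter (fun c => !(pvEnvGet e0 "branch" == c)) := by
      simp [hb, hm]
    rw [if_pos this]
    rw [if_neg (by intro h; exact hm h.2)]
    cases List.find? (pvMatchFull b) rest <;> simp

theorem pvPortsAgree (environments : List (List (String × String))) (branches : List String)
    (hpre : (∀ env ∈ environments, "slug" ∈ env.map Prod.fst) ∧
      (branches ≠ [] → environments ≠ [] ∧ ∀ env ∈ environments, "branch" ∈ env.map Prod.fst)) :
    group_branches_by_environment environments branches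
      = group_branches_by_environment_alt environments branches := by
  cases hbr : branches with
  | nil => simp [group_branches_by_environment, group_branches_by_environment_alt]
  | cons hd tl =>
    obtain ⟨henv, -⟩ := hpre.2 (by simp [hbr])
    obtain ⟨e0, rest, rfl⟩ : ∃ e0 rest, environments = e0 :: rest := by
      cases environments with
      | nil => exact absurd rfl henv
      | cons a as => exact ⟨a, as, rfl⟩
    rw [← hbr]
    unfold group_branches_by_environment group_branches_by_environment_alt
    apply congrArg PySem.Dict.items
    apply PySem.List.foldl_congr_mem
    intro acc x hx
    have hx' : x ∈ branches := hx
    have hget : get_environment_for_branch x (e0 :: rest)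
        = if pvEnvGet e0 "branch" == x then some e0
          else pvFindLoop x rest := by
      have h0 : PySem.List.pyGet? (e0 :: rest) 0 = some e0 := by
        simp [PySem.List.pyGet?, PySem.List.pyIdx?]
      have hs : PySem.List.slice (e0 :: rest) (some 1) none = rest := by
        rw [PySem.List.slice_from _ (by norm_num)]
        simp
      rw [get_environment_for_branch, h0, hs]
    have hassign := pvClaimLoop_top e0 rest branches x hx'
    rw [hget]
    rw [PySem.Dict.getD_eq_get?_getD, hassign]
    by_cases hm : (pvEnvGet e0 "branch" == x) = true
    · rw [if_pos hm, if_pos hm]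
      simp
    · rw [if_neg hm, if_neg hm, pvFindLoop_eq_find?]
      cases List.find? (pvMatchFull x) rest <;> simp

-- ===== VERDICT (by name: the statement is the Claim_ definition above) =====
theorem group_branches_by_environment_spec : Claim_equal_group_branches_by_environment := by
  intro environments branches _ hpre
  unfold Spec_group_branches_by_environment
  exact pvPortsAgree environments branches hpre
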